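-- pv_equiv track=rewrite | github.com/qbquentin-b/projet_vrp | Projet/operators_genetic.py | _get_routes_from_representation
-- ===== SOURCE A (Python) =====
-- def _get_routes_from_representation(representation):
--     """Utilitaire pour extraire les tournées."""
--     routes = []
--     current_route = []
--     for node_id in representation[1:]:
--         if node_id == 0:
--             if current_route:
--                 routes.append(current_route)
--             current_route = []
--         else:
--             current_route.append(node_id)
--     return routes
-- ===== SOURCE B (Python) =====
-- def _get_routes_from_representation(representation):
--     """Extract routes by recursively splitting at the first zero delimiter."""
--     def split(seq):
--         if 0 not in seq:
--             return []
--         i = seq.index(0)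
--         head = seq[:i]
--         rest = split(seq[i + 1:])
--         return ([head] if head else []) + rest
--     return split(representation[1:])
-- ===== Notes on version B (the rewrite author's own statement) =====
-- stated objective: alternative
-- what changed: Replaces the element-by-element accumulator loop with a recursive split at the first zero: find index of 0, slice the head segment, recurse on the remainder; elements after the last zero are naturally dropped because no zero is found.
import Mathlib
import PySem

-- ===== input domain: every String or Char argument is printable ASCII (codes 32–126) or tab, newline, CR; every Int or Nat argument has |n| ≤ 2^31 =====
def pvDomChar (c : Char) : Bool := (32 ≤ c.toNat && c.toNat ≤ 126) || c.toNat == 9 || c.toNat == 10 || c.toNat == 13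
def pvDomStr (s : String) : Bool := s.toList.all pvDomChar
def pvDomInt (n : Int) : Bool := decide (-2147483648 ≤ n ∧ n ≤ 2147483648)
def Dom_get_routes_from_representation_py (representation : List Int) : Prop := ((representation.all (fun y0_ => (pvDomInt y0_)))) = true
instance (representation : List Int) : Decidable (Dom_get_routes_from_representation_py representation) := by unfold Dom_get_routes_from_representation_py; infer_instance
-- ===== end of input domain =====

-- B replaces A's accumulator loop by a recursive split at the first zero delimiter (alternative decomposition, same cost).


-- ===== PORT A =====
-- representation[1:] is the slice from index 1 (= drop 1 for a nonnegative in-range start);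
-- the for-loop is a foldl over state (routes, current_route).
def get_routes_from_representation_py (representation : List Int) : List (List Int) :=
  ((representation.drop 1).foldl
    (fun (st : List (List Int) × List Int) node_id =>
      if node_id = 0 then
        (if st.2.isEmpty then st.1 else st.1 ++ [st.2], [])
      else
        (st.1, st.2 ++ [node_id]))
    ([], [])).1

-- ===== PORT B =====
-- '0 in seq' / 'seq.index(0)' → membership test / idxOf (guarded, so index never raises);
-- seq[:i] → take i, seq[i+1:] → drop (i+1) (nonnegative in-range slices).
def pvSplitB (seq : List Int) : List (List Int) :=
  if h : (0 : Int) ∈ seq then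
    let i := seq.idxOf 0
    let head := seq.take i
    let rest := pvSplitB (seq.drop (i + 1))
    (if head.isEmpty then [] else [head]) ++ rest
  else []
termination_by seq.length
decreasing_by
  have hne : seq ≠ [] := by intro hnil; simp [hnil] at h
  simp only [List.length_drop]
  have : 0 < seq.length := List.length_pos_iff.mpr hne
  omega

def get_routes_from_representation_py_alt (representation : List Int) : List (List Int) :=
  pvSplitB (representation.drop 1)

-- ===== PRECONDITION & SPEC =====
def Spec_get_routes_from_representation_py (representation : List Int) (out : List (List Int)) : Prop := out = get_routes_from_representation_py_alt representation
instance (representation : List Int) (out : List (List Int)) : Decidable (Spec_get_routes_from_representation_py representation out) := by unfold Spec_get_routes_from_representation_py; infer_instance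

-- ===== CLAIM (what is proved, stated in full; the proofs are below) =====
def Claim_equal_get_routes_from_representation_py : Prop := ∀ (representation : List Int), Dom_get_routes_from_representation_py representation → Spec_get_routes_from_representation_py representation (get_routes_from_representation_py representation)

-- ===== LEMMAS AND PROOFS =====

theorem pvSplitB_not_mem {seq : List Int} (h : (0 : Int) ∉ seq) : pvSplitB seq = [] := by
  rw [pvSplitB]; simp [h]

theorem pvSplitB_cut (cur t : List Int) (h : (0 : Int) ∉ cur) :
    pvSplitB (cur ++ 0 :: t) = (if cur.isEmpty then [] else [cur]) ++ pvSplitB t := by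
  rw [pvSplitB]
  have hmem : (0 : Int) ∈ cur ++ 0 :: t := by simp
  have hidx : (cur ++ 0 :: t).idxOf 0 = cur.length := by
    rw [List.idxOf_append_of_notMem h]; simp
  simp only [dif_pos hmem, hidx]
  have htake : (cur ++ 0 :: t).take cur.length = cur := List.take_left ..
  have hdrop : (cur ++ 0 :: t).drop (cur.length + 1) = t := by
    rw [show cur.length + 1 = (cur ++ [(0 : Int)]).length by simp,
        show cur ++ 0 :: t = (cur ++ [0]) ++ t by simp]
    exact List.drop_left ..
  rw [htake, hdrop]

theorem loopA_eq (seq : List Int) : ∀ (routes : List (List Int)) (cur : List Int),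
    (0 : Int) ∉ cur →
    (seq.foldl
      (fun (st : List (List Int) × List Int) node_id =>
        if node_id = 0 then
          (if st.2.isEmpty then st.1 else st.1 ++ [st.2], [])
        else
          (st.1, st.2 ++ [node_id]))
      (routes, cur)).1 = routes ++ pvSplitB (cur ++ seq) := by
  induction seq with
  | nil =>
    intro routes cur h
    simp [pvSplitB_not_mem (by simpa using h)]
  | cons x t ih =>
    intro routes cur h
    by_cases hx : x = 0
    · subst hx
      simp only [List.foldl_cons, if_true]
      rw [ih _ [] (by simp)]
      rw [pvSplitB_cut cur t h]
      by_cases hcur : cur.isEmpty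
      · simp [hcur]
      · simp [hcur, List.append_assoc]
    · simp only [List.foldl_cons, if_neg hx]
      rw [ih routes (cur ++ [x]) (by simp [h, Ne.symm hx])]
      simp

-- ===== VERDICT (by name: the statement is the Claim_ definition above) =====
theorem get_routes_from_representation_py_spec : Claim_equal_get_routes_from_representation_py := by
  intro representation _
  unfold Spec_get_routes_from_representation_py get_routes_from_representation_py get_routes_from_representation_py_alt
  rw [loopA_eq _ [] [] (by simp)]
  simp
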